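-- pv_equiv track=rewrite | github.com/brandonabajelo/Glimpse | Glimpse/create_json_structs.py | sort_for_gender_chart
-- ===== SOURCE A (Python) =====
-- def sort_for_gender_chart(data):
--     new_data = {k: {'male': 0, 'female': 0} for k in data.keys()}
--     for dept, roles in data.items():
--         male = female = 0
--         for role, employees in roles.items():
--             male += sum([1 for e in employees if e['gender'] == 'M'])
--             female += sum([1 for e in employees if e['gender'] == 'F'])
--         new_data[dept]['male'] = male
--         new_data[dept]['female'] = female
--
--     return new_data
-- ===== SOURCE B (Python) =====
-- def sort_for_gender_chart(data):
--     new_data = {}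
--     for dept, roles in data.items():
--         tally = {}
--         for employees in roles.values():
--             for e in employees:
--                 g = e['gender']
--                 tally[g] = tally.get(g, 0) + 1
--         new_data[dept] = {'male': tally.get('M', 0), 'female': tally.get('F', 0)}
--     return new_data
-- ===== Notes on version B (the rewrite author's own statement) =====
-- stated objective: idiomatic
-- what changed: Replaces the two filtered list-comprehension scans per role with a single tally pass over all employees of the department, reading the 'M' and 'F' counts from the tally, and builds each department's result dict in one step instead of pre-initializing zeros and mutating.
import Mathlib
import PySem

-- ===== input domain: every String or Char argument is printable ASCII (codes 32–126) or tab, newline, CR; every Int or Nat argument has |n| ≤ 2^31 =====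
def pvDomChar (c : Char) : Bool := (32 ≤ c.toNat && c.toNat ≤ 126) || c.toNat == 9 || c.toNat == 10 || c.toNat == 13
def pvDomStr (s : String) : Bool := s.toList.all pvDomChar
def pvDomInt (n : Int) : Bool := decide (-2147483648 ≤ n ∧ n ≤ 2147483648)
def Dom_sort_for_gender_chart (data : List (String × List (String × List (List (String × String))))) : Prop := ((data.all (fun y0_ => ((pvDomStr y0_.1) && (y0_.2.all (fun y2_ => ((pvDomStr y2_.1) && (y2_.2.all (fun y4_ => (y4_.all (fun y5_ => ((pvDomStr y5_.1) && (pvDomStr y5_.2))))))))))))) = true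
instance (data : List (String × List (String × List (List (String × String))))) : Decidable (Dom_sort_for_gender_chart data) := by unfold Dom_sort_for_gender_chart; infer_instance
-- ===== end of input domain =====

-- B replaces A's two filtered comprehensions per role by one tally pass over all of the
-- department's employees, then reads the 'M'/'F' counts from the tally and builds each
-- department's result dict in one step (no zero pre-initialisation pass).

-- ===== PORT A =====
def sort_for_gender_chart (data : List (String × List (String × List (List (String × String))))) : List (String × List (String × Int)) :=
  let new_data : PySem.Dict String (PySem.Dict String Int) :=
    data.foldl (fun nd p => nd.insert p.1 (PySem.Dict.ofList [("male", (0 : Int)), ("female", (0 : Int))])) PySem.Dict.empty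
  let new_data :=
    data.foldl (fun nd p =>
      let mf : Int × Int :=
        p.2.foldl (fun (mf : Int × Int) rp =>
          (mf.1 + ((rp.2.filter (fun e => (PySem.Dict.mk e).getD "gender" "" == "M")).map (fun _ => (1 : Int))).sum,
           mf.2 + ((rp.2.filter (fun e => (PySem.Dict.mk e).getD "gender" "" == "F")).map (fun _ => (1 : Int))).sum)) (0, 0)
      -- new_data[dept]['male'] = male; new_data[dept]['female'] = female  (two in-place updates of the fetched inner dict)
      nd.modify p.1 PySem.Dict.empty (fun inner => (inner.insert "male" mf.1).insert "female" mf.2)) new_data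
  new_data.items.map (fun q => (q.1, q.2.items))

-- ===== PORT B =====
def sort_for_gender_chart_alt (data : List (String × List (String × List (List (String × String))))) : List (String × List (String × Int)) :=
  (data.foldl (fun nd p =>
      let tally : PySem.Dict String Int :=
        p.2.foldl (fun t rp =>
          rp.2.foldl (fun t e =>
            let g := (PySem.Dict.mk e).getD "gender" ""
            t.insert g (t.getD g 0 + 1)) t) PySem.Dict.empty
      nd.insert p.1 (PySem.Dict.ofList [("male", tally.getD "M" 0), ("female", tally.getD "F" 0)]))
    PySem.Dict.empty).items.map (fun q => (q.1, q.2.items))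

-- ===== PRECONDITION & SPEC =====
-- Pre_ excludes exactly the inputs where some employee record lacks the key "gender":
-- there Python A (and Python B) raise KeyError.
def Pre_sort_for_gender_chart (data : List (String × List (String × List (List (String × String))))) : Prop :=
  ∀ p ∈ data, ∀ rp ∈ p.2, ∀ e ∈ rp.2, (PySem.Dict.mk e).contains "gender" = true
instance (data : List (String × List (String × List (List (String × String))))) : Decidable (Pre_sort_for_gender_chart data) := by unfold Pre_sort_for_gender_chart; infer_instance
def pvWitness_sort_for_gender_chart : (List (String × List (String × List (List (String × String))))) :=
  [("eng", [("dev", [[("gender", "M")], [("gender", "F")], [("gender", "X")]]), ("qa", [[("gender", "F")]])]), ("hr", [])]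
def Spec_sort_for_gender_chart (data : List (String × List (String × List (List (String × String))))) (out : List (String × List (String × Int))) : Prop := out = sort_for_gender_chart_alt data
instance (data : List (String × List (String × List (List (String × String))))) (out : List (String × List (String × Int))) : Decidable (Spec_sort_for_gender_chart data out) := by unfold Spec_sort_for_gender_chart; infer_instance

-- ===== CLAIM (what is proved, stated in full; the proofs are below) =====
def Claim_equal_sort_for_gender_chart : Prop := ∀ (data : List (String × List (String × List (List (String × String))))), Dom_sort_for_gender_chart data → Pre_sort_for_gender_chart data → Spec_sort_for_gender_chart data (sort_for_gender_chart data)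

-- ===== LEMMAS AND PROOFS =====

-- gender of an employee record, as both ports read it
def pvG (e : List (String × String)) : String := (PySem.Dict.mk e).getD "gender" ""

-- per-department count of gender x, the common value both inner loops compute
def pvCnt (roles : List (String × List (List (String × String)))) (x : String) : Int :=
  (roles.map (fun rp => ((rp.2.map pvG).count x : Int))).sum

-- the inner dict both ports end up storing for a department
def pvZ (a b : Int) : PySem.Dict String Int := PySem.Dict.mk [("male", a), ("female", b)]

-- every inner value a dict may hold during A's second phase
def pvGood (d : PySem.Dict String (PySem.Dict String Int)) : Prop :=
  ∀ v ∈ d.values, ∃ a b, v = pvZ a b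

lemma pvZ_ofList (a b : Int) : PySem.Dict.ofList [("male", a), ("female", b)] = pvZ a b := by
  simp [pvZ, PySem.Dict.ofList, PySem.Dict.update, PySem.Dict.insert, PySem.Dict.contains, PySem.Dict.empty]

lemma pvZ_step (a b m f : Int) : ((pvZ a b).insert "male" m).insert "female" f = pvZ m f := by
  simp [pvZ, PySem.Dict.insert, PySem.Dict.contains]

lemma pvZ_empty (m f : Int) : ((PySem.Dict.empty.insert "male" m).insert "female" f : PySem.Dict String Int) = pvZ m f := by
  simp [pvZ, PySem.Dict.insert, PySem.Dict.contains, PySem.Dict.empty]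

lemma pv_sum_filter (l : List (List (String × String))) (x : String) :
    ((l.filter (fun e => (PySem.Dict.mk e).getD "gender" "" == x)).map (fun _ => (1 : Int))).sum
      = ((l.map pvG).count x : Int) := by
  rw [List.count_eq_countP, List.countP_map, List.countP_eq_length_filter]
  simp [Function.comp_def, pvG]

lemma pv_pairfold (roles : List (String × List (List (String × String)))) (a b : Int) :
    roles.foldl (fun (mf : Int × Int) rp =>
        (mf.1 + ((rp.2.filter (fun e => (PySem.Dict.mk e).getD "gender" "" == "M")).map (fun _ => (1 : Int))).sum,
         mf.2 + ((rp.2.filter (fun e => (PySem.Dict.mk e).getD "gender" "" == "F")).map (fun _ => (1 : Int))).sum)) (a, b)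
      = (a + pvCnt roles "M", b + pvCnt roles "F") := by
  induction roles generalizing a b with
  | nil => simp [pvCnt]
  | cons rp roles ih =>
    rw [List.foldl_cons, ih]
    simp only [pv_sum_filter, pvCnt, List.map_cons, List.sum_cons]
    rw [Prod.mk.injEq]
    constructor <;> ring

lemma pv_tally (roles : List (String × List (List (String × String)))) (t : PySem.Dict String Int) (x : String) :
    (roles.foldl (fun t rp =>
        rp.2.foldl (fun t e =>
          t.insert ((PySem.Dict.mk e).getD "gender" "") (t.getD ((PySem.Dict.mk e).getD "gender" "") 0 + 1)) t) t).getD x 0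
      = t.getD x 0 + pvCnt roles x := by
  induction roles generalizing t with
  | nil => simp [pvCnt]
  | cons rp roles ih =>
    rw [List.foldl_cons, ih]
    have h : rp.2.foldl (fun t e =>
          t.insert ((PySem.Dict.mk e).getD "gender" "") (t.getD ((PySem.Dict.mk e).getD "gender" "") 0 + 1)) t
        = (rp.2.map pvG).foldl (fun t g => t.insert g (t.getD g 0 + 1)) t := by
      rw [List.foldl_map]
      rfl
    rw [h, PySem.Dict.getD_foldl_insert_add_one]
    simp only [pvCnt, List.map_cons, List.sum_cons]
    ring

-- A's in-place update equals storing the fresh inner dict, on pvGood accumulators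
lemma pv_modify_eq_insert (d : PySem.Dict String (PySem.Dict String Int)) (hd : pvGood d) (k : String) (m f : Int) :
    d.modify k PySem.Dict.empty (fun inner => (inner.insert "male" m).insert "female" f)
      = d.insert k (pvZ m f) := by
  show d.insert k (((d.getD k PySem.Dict.empty).insert "male" m).insert "female" f) = _
  rcases h : d.get? k with _ | v
  · rw [PySem.Dict.getD_eq_get?_getD, h, Option.getD_none, pvZ_empty]
  · have hv : v ∈ d.values := by
      have := PySem.Dict.mem_items_of_get?_eq_some (d := d) (k := k) (v := v) h
      simp only [PySem.Dict.values]
      exact List.mem_map.2 ⟨(k, v), this, rfl⟩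
    obtain ⟨a, b, rfl⟩ := hd v hv
    rw [PySem.Dict.getD_eq_get?_getD, h, Option.getD_some, pvZ_step]

lemma pv_good_insert (d : PySem.Dict String (PySem.Dict String Int)) (hd : pvGood d) (k : String) (m f : Int) :
    pvGood (d.insert k (pvZ m f)) := by
  intro v hv
  rcases PySem.Dict.mem_values_insert _ _ _ _ hv with h | h
  · exact ⟨m, f, h⟩
  · exact hd v h

lemma pv_good_fold (l : List (String × List (String × List (List (String × String)))))
    (d : PySem.Dict String (PySem.Dict String Int)) (hd : pvGood d) :
    pvGood (l.foldl (fun nd p => nd.insert p.1 (pvZ 0 0)) d) := by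
  induction l generalizing d with
  | nil => exact hd
  | cons p l ih => exact ih _ (pv_good_insert d hd _ _ _)

-- last-occurrence characterisation of a fold of inserts with accumulator-independent values
lemma pv_get_foldl_insert {β : Type} (V : β → PySem.Dict String Int) (key : β → String)
    (l : List β) (d : PySem.Dict String (PySem.Dict String Int)) (k : String) :
    (l.foldl (fun nd p => nd.insert (key p) (V p)) d).get? k
      = (l.reverse.find? (fun p => key p == k)).elim (d.get? k) (fun p => some (V p)) := by
  induction l generalizing d with
  | nil => simp
  | cons p l ih =>
    rw [List.foldl_cons, ih, List.reverse_cons, List.find?_append]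
    rcases hf : l.reverse.find? (fun p => key p == k) with _ | q
    · simp only [Option.none_or, Option.elim]
      by_cases hk : key p = k
      · simp [hk]
      · simp only [PySem.Dict.get?_insert]
        rw [if_neg (fun h => hk h.symm)]
        simp [hk]
    · simp

-- A's two-phase loop equals B's single-phase loop, step by step, from a pvGood start
lemma pv_main (M F : (String × List (String × List (List (String × String)))) → Int)
    (l : List (String × List (String × List (List (String × String)))))
    (d : PySem.Dict String (PySem.Dict String Int)) (hd : pvGood d) :
    l.foldl (fun nd p => nd.modify p.1 PySem.Dict.empty (fun inner => (inner.insert "male" (M p)).insert "female" (F p))) d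
      = l.foldl (fun nd p => nd.insert p.1 (pvZ (M p) (F p))) d := by
  induction l generalizing d with
  | nil => rfl
  | cons p l ih =>
    rw [List.foldl_cons, List.foldl_cons, pv_modify_eq_insert d hd, ih _ (pv_good_insert d hd _ _ _)]

-- pre-inserting all the keys (A's zero-initialisation pass) does not change the final dict
lemma pv_start (W : (String × List (String × List (List (String × String)))) → PySem.Dict String Int)
    (data : List (String × List (String × List (List (String × String))))) :
    data.foldl (fun nd p => nd.insert p.1 (W p))
      (data.foldl (fun nd p => nd.insert p.1 (pvZ 0 0)) PySem.Dict.empty)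
      = data.foldl (fun nd p => nd.insert p.1 (W p)) PySem.Dict.empty := by
  set d0 := data.foldl (fun nd p => nd.insert p.1 (pvZ 0 0)) PySem.Dict.empty with hd0
  have hkeys0 : d0.keys = PySem.Set.ofList (data.map (·.1)) := by
    rw [hd0, PySem.Dict.keys_foldl_insert_key data (·.1)]
    simp [PySem.Dict.empty, PySem.Dict.keys, PySem.Set.update_nil_left]
  have hnd0 : d0.keys.Nodup := by
    rw [hkeys0]; exact PySem.Set.nodup_ofList _
  have hnL : (data.foldl (fun nd p => nd.insert p.1 (W p)) d0).keys.Nodup :=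
    PySem.Dict.nodup_keys_foldl_insert_key data (·.1) _ _ hnd0
  have hnR : (data.foldl (fun nd p => nd.insert p.1 (W p)) PySem.Dict.empty).keys.Nodup :=
    PySem.Dict.nodup_keys_foldl_insert_key data (·.1) _ _ (by simp [PySem.Dict.empty, PySem.Dict.keys])
  have hK : (data.foldl (fun nd p => nd.insert p.1 (W p)) d0).keys
      = (data.foldl (fun nd p => nd.insert p.1 (W p)) PySem.Dict.empty).keys := by
    rw [PySem.Dict.keys_foldl_insert_key data (·.1), PySem.Dict.keys_foldl_insert_key data (·.1),
        PySem.Dict.keys_foldl_insert_key data (·.1)]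
    have h1 : (PySem.Dict.empty : PySem.Dict String (PySem.Dict String Int)).keys = ([] : List String) := rfl
    rw [h1, PySem.Set.update_nil_left, PySem.Set.update_eq_append_filter]
    have : (PySem.Set.ofList (data.map (·.1))).filter
        (fun y => !(PySem.Set.ofList (data.map (·.1))).contains y) = [] := by
      rw [List.filter_eq_nil_iff]
      intro y hy
      simp at *
      exact hy
    rw [this, List.append_nil]
  have hG : ∀ k, (data.foldl (fun nd p => nd.insert p.1 (W p)) d0).get? k
      = (data.foldl (fun nd p => nd.insert p.1 (W p)) PySem.Dict.empty).get? k := by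
    intro k
    rw [pv_get_foldl_insert W (·.1), pv_get_foldl_insert W (·.1)]
    rcases hf : data.reverse.find? (fun p => p.1 == k) with _ | q
    · simp only [hf, Option.elim]
      rw [pv_get_foldl_insert (fun _ => pvZ 0 0)
            (fun p : String × List (String × List (List (String × String))) => p.1) data PySem.Dict.empty k, hf]
      rfl
    · simp [hf]
  apply PySem.Dict.ext
  rw [PySem.Dict.items_eq_map_keys _ hnL (pvZ 0 0), PySem.Dict.items_eq_map_keys _ hnR (pvZ 0 0), hK]
  apply List.map_congr_left
  intro k _
  rw [PySem.Dict.getD_eq_get?_getD, PySem.Dict.getD_eq_get?_getD, hG k]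

-- ===== VERDICT (by name: the statement is the Claim_ definition above) =====
theorem sort_for_gender_chart_spec : Claim_equal_sort_for_gender_chart := by
  intro data _ _
  show sort_for_gender_chart data = sort_for_gender_chart_alt data
  simp only [sort_for_gender_chart, sort_for_gender_chart_alt, pv_pairfold, pv_tally, pvZ_ofList,
    PySem.Dict.getD_empty, zero_add]
  rw [pv_main (fun p => pvCnt p.2 "M") (fun p => pvCnt p.2 "F") data _
        (pv_good_fold data PySem.Dict.empty (by intro v hv; simp [PySem.Dict.empty, PySem.Dict.values] at hv)),
      pv_start (fun p => pvZ (pvCnt p.2 "M") (pvCnt p.2 "F")) data]
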